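-- pv_equiv track=rewrite | github.com/mdandre89/Codewars-exercises | divisible-by-previous-digit/divisible-by-previous-digit.py | divisible_by_last
-- ===== SOURCE A (Python) =====
-- def divisible_by_last(n):
--     itera = iter(list('0' + str(n)))
--     ls = []
--     for value in str(n):
--         preceding = int(next(itera))
--         if preceding == 0 or int(value)%preceding:
--             ls.append(False)
--         else:
--             ls.append(True)
--     return ls
-- ===== SOURCE B (Python) =====
-- def _digits_checks(n):
--     """Return (checks, last_digit) for the digits of n, recursing on n // 10."""
--     q, d = divmod(n, 10)
--     if q == 0:
--         return [False], d
--     ls, p = _digits_checks(q)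
--     ls.append(p != 0 and d % p == 0)
--     return ls, d
--
--
-- def divisible_by_last(n):
--     return _digits_checks(n)[0]
-- ===== Notes on version B (the rewrite author's own statement) =====
-- stated objective: alternative
-- what changed: Replaces A's string conversion with a shifted '0'-prefixed iterator by a purely arithmetic recursion on divmod(n, 10) that builds the answer list most-significant-first and threads the previous digit through the recursion's return value.
import Mathlib
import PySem

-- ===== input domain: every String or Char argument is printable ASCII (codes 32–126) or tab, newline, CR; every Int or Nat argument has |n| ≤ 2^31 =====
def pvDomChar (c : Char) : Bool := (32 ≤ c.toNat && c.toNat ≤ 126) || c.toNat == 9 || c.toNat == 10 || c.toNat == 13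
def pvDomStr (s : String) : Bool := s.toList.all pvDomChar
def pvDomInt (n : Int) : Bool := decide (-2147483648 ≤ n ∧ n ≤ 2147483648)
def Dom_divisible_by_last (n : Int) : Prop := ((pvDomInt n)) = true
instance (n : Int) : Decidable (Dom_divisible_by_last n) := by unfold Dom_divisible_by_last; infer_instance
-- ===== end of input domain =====

-- B drops string conversion entirely: a recursion on divmod(n, 10) threads the previous digit (alternative decomposition, same cost).

-- ===== PORT A =====
-- int(c) for a single digit character (on Pre_ every character of str(n) is a digit)
def pvChDigit (c : Char) : Int := (c.toNat : Int) - 48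

-- iter(list('0'+str(n))) is the state list; next(itera) pops its head
def pvStepA (st : List Char × List Bool) (value : Char) : List Char × List Bool :=
  match st.1 with
  | [] => st
  | p :: rest =>
    let preceding := pvChDigit p
    if preceding = 0 ∨ PySem.Int.mod (pvChDigit value) preceding ≠ 0 then
      (rest, st.2 ++ [false])
    else
      (rest, st.2 ++ [true])

def divisible_by_last (n : Int) : List Bool :=
  let s := (PySem.Int.toStr n).toList
  (s.foldl pvStepA ('0' :: s, [])).2

-- ===== PORT B =====
-- _digits_checks(n): recursion on divmod(n, 10); fuel only makes the recursion total
-- (for every n ≥ 0 the fuel passed below is never exhausted; Python recurses on q until q == 0)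
def pvDigitsChecks : Nat → Int → List Bool × Int
  | 0, n => ([false], PySem.Int.mod n 10)
  | f + 1, n =>
    let q := PySem.Int.floordiv n 10
    let d := PySem.Int.mod n 10
    if q = 0 then ([false], d)
    else
      let r := pvDigitsChecks f q
      (r.1 ++ [decide (r.2 ≠ 0) && decide (PySem.Int.mod d r.2 = 0)], d)

def divisible_by_last_alt (n : Int) : List Bool :=
  (pvDigitsChecks (n.toNat + 1) n).1

-- ===== PRECONDITION & SPEC =====
-- Pre_ excludes negative n, on which A raises ValueError (int('-')) and B hits Python's recursion limit.
def Pre_divisible_by_last (n : Int) : Prop := 0 ≤ n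
instance (n : Int) : Decidable (Pre_divisible_by_last n) := by unfold Pre_divisible_by_last; infer_instance
def pvWitness_divisible_by_last : Int := (73312)

def Spec_divisible_by_last (n : Int) (out : List Bool) : Prop := out = divisible_by_last_alt n
instance (n : Int) (out : List Bool) : Decidable (Spec_divisible_by_last n out) := by unfold Spec_divisible_by_last; infer_instance

-- ===== CLAIM (what is proved, stated in full; the proofs are below) =====
def Claim_equal_divisible_by_last : Prop := ∀ (n : Int), Dom_divisible_by_last n → Pre_divisible_by_last n → Spec_divisible_by_last n (divisible_by_last n)

-- ===== LEMMAS AND PROOFS =====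

-- the common specification: checks of the digit list ds (most significant first) with previous digit p
def pvPairMap (p : Int) : List Int → List Bool
  | [] => []
  | d :: ds => (decide (p ≠ 0) && decide (PySem.Int.mod d p = 0)) :: pvPairMap d ds

def pvDs (m : Nat) : List Int := (Nat.toDigits 10 m).map pvChDigit

-- running-prev reformulation of A's shifted-iterator loop
def pvStepB (st : Int × List Bool) (ch : Char) : Int × List Bool :=
  (pvChDigit ch, st.2 ++ [decide (st.1 ≠ 0) && decide (PySem.Int.mod (pvChDigit ch) st.1 = 0)])

-- A's iterator is one char ahead of the loop list; that char is the running prev digit.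
lemma pv_lockstep : ∀ (l : List Char) (p : Char) (acc : List Bool),
    (l.foldl pvStepA (p :: l, acc)).2 = (l.foldl pvStepB (pvChDigit p, acc)).2 := by
  intro l
  induction l with
  | nil => intro p acc; simp
  | cons c cs ih =>
    intro p acc
    simp only [List.foldl_cons, pvStepA, pvStepB]
    split_ifs with h
    · rw [ih]
      congr 2
      rcases h with h | h <;> simp [h]
    · rw [ih]
      push Not at h
      congr 2
      simp [h.1, h.2]

lemma pv_foldB_pairMap : ∀ (l : List Char) (p : Int) (acc : List Bool),
    (l.foldl pvStepB (p, acc)).2 = acc ++ pvPairMap p (l.map pvChDigit) := by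
  intro l
  induction l with
  | nil => intro p acc; simp [pvPairMap]
  | cons c cs ih =>
    intro p acc
    simp [List.foldl_cons, pvStepB, pvPairMap, ih]

lemma pv_chDigit_digitChar (d : Nat) (hd : d < 10) : pvChDigit (Nat.digitChar d) = (d : Int) := by
  interval_cases d <;> decide

lemma pv_pairMap_concat : ∀ (ds : List Int) (p d : Int),
    pvPairMap p (ds ++ [d]) =
      pvPairMap p ds ++ [decide (ds.getLastD p ≠ 0) && decide (PySem.Int.mod d (ds.getLastD p) = 0)] := by
  intro ds
  induction ds with
  | nil => intro p d; simp [pvPairMap]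
  | cons e es ih =>
    intro p d
    have h : (e :: es).getLast?.getD p = es.getLast?.getD e := by
      cases es <;> simp [List.getLast?_cons]
    simp [pvPairMap, ih, h]

lemma pv_ds_lt (m : Nat) (hm : m < 10) : pvDs m = [(m : Int)] := by
  rw [pvDs, Nat.toDigits_of_lt_base hm]
  simp [pv_chDigit_digitChar m hm]

lemma pv_ds_ge (m : Nat) (hm : 10 ≤ m) : pvDs m = pvDs (m / 10) ++ [((m % 10 : Nat) : Int)] := by
  rw [pvDs, Nat.toDigits_of_base_le (by norm_num) hm]
  simp [pvDs, pv_chDigit_digitChar (m % 10) (Nat.mod_lt m (by norm_num))]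

-- B's recursion computes (pvPairMap 0 (digits), last digit), given enough fuel
lemma pv_helper_spec : ∀ (m f : Nat), m < 10 ^ f →
    pvDigitsChecks f (m : Int) = (pvPairMap 0 (pvDs m), (pvDs m).getLastD 0) := by
  intro m
  induction m using Nat.strong_induction_on with
  | _ m ih =>
    intro f hf
    cases f with
    | zero =>
      have hm0 : m = 0 := by simpa using hf
      subst hm0
      simp [pvDigitsChecks, pv_ds_lt 0 (by norm_num), pvPairMap, PySem.Int.mod]
    | succ f' =>
      by_cases hm : m < 10
      · have hq : PySem.Int.floordiv (m : Int) 10 = 0 := by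
          rw [show ((10 : Int)) = ((10 : Nat) : Int) by norm_num, PySem.Int.floordiv_natCast]
          simp [Nat.div_eq_of_lt hm]
        have hd : PySem.Int.mod (m : Int) 10 = (m : Int) := by
          rw [show ((10 : Int)) = ((10 : Nat) : Int) by norm_num, PySem.Int.mod_natCast]
          simp [Nat.mod_eq_of_lt hm]
        simp only [pvDigitsChecks]
        rw [hq, hd]
        simp [pv_ds_lt m hm, pvPairMap]
      · push Not at hm
        have hq : PySem.Int.floordiv (m : Int) 10 = ((m / 10 : Nat) : Int) := by
          rw [show ((10 : Int)) = ((10 : Nat) : Int) by norm_num, PySem.Int.floordiv_natCast]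
        have hd : PySem.Int.mod (m : Int) 10 = ((m % 10 : Nat) : Int) := by
          rw [show ((10 : Int)) = ((10 : Nat) : Int) by norm_num, PySem.Int.mod_natCast]
        have hqne : ((m / 10 : Nat) : Int) ≠ 0 := by
          have : 1 ≤ m / 10 := Nat.one_le_div_iff (by norm_num) |>.mpr hm
          exact_mod_cast Nat.one_le_iff_ne_zero.mp this
        have hlt : m / 10 < m := Nat.div_lt_self (by omega) (by norm_num)
        have hfuel : m / 10 < 10 ^ f' := by
          have hmul : m < 10 ^ f' * 10 := by rw [← pow_succ]; exact hf
          exact (Nat.div_lt_iff_lt_mul (by norm_num)).mpr hmul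
        have hih := ih (m / 10) hlt f' hfuel
        simp only [pvDigitsChecks]
        rw [hq, hd, if_neg hqne, hih]
        rw [pv_ds_ge m hm, pv_pairMap_concat]
        simp
lemma pv_fuel_enough (m : Nat) : m < 10 ^ (m + 1) := by
  calc m < 2 ^ m := Nat.lt_two_pow_self
    _ ≤ 10 ^ m := Nat.pow_le_pow_left (by norm_num) m
    _ ≤ 10 ^ (m + 1) := Nat.pow_le_pow_right (by norm_num) (Nat.le_succ m)

-- ===== VERDICT (by name: the statement is the Claim_ definition above) =====
theorem divisible_by_last_spec : Claim_equal_divisible_by_last := by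
  intro n _ hn
  unfold Spec_divisible_by_last divisible_by_last divisible_by_last_alt
  obtain ⟨m, rfl⟩ : ∃ m : Nat, n = (m : Int) := ⟨n.toNat, (Int.toNat_of_nonneg hn).symm⟩
  rw [pv_lockstep, pv_foldB_pairMap]
  have htn : (m : Int).toNat = m := Int.toNat_natCast m
  rw [htn, pv_helper_spec m (m + 1) (pv_fuel_enough m)]
  have hchars : (PySem.Int.toStr (m : Int)).toList = Nat.toDigits 10 m := by
    rw [PySem.Int.toList_toStr]
    simp [PySem.Int.toChars, Int.toNat_natCast, not_lt.mpr (Int.natCast_nonneg m)]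
  rw [hchars]
  show pvPairMap (pvChDigit '0') ((Nat.toDigits 10 m).map pvChDigit) = _
  have : pvChDigit '0' = 0 := by decide
  rw [this]
  rfl
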